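-- pv_equiv track=rewrite | github.com/Cloudie-yun/InsightHub | services/diagram_vision_service.py | _repair_json_text
-- ===== SOURCE A (Python) =====
-- def _repair_json_text(text: str) -> str:
--     repaired: list[str] = []
--     in_string = False
--     escape_next = False
--     length = len(text)
--     index = 0
--
--     while index < length:
--         char = text[index]
--
--         if escape_next:
--             repaired.append(char)
--             escape_next = False
--             index += 1
--             continue
--
--         if char == "\\":
--             repaired.append(char)
--             escape_next = True
--             index += 1
--             continue
--
--         if char == '"':
--             if in_string:
--                 look_ahead = index + 1
--                 while look_ahead < length and text[look_ahead] in " \t\r\n":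
--                     look_ahead += 1
--                 next_char = text[look_ahead] if look_ahead < length else ""
--                 if next_char and next_char not in {",", "}", "]", ":"}:
--                     repaired.append('\\"')
--                     index += 1
--                     continue
--             in_string = not in_string
--             repaired.append(char)
--             index += 1
--             continue
--
--         if in_string and char == "\n":
--             repaired.append("\\n")
--             index += 1
--             continue
--
--         if in_string and char == "\r":
--             repaired.append("\\r")
--             index += 1
--             continue
--
--         if in_string and char == "\t":
--             repaired.append("\\t")
--             index += 1
--             continue
--
--         repaired.append(char)
--         index += 1
--
--     return "".join(repaired)
-- ===== SOURCE B (Python) =====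
-- def _repair_json_text(text: str) -> str:
--     WS = " \t\r\n"
--     DELIMS = {",", "}", "]", ":"}
--     ESC = {"\n": "\\n", "\r": "\\r", "\t": "\\t"}
--     out = []
--     in_string = False
--     escape_next = False
--     pending = None  # whitespace buffered after an in-string '"', awaiting the decision
--
--     def normal(ch):
--         # ordinary state-machine step; returns True when an in-string '"'
--         # opens a pending-close decision
--         nonlocal in_string, escape_next
--         if escape_next:
--             out.append(ch)
--             escape_next = False
--         elif ch == "\\":
--             out.append(ch)
--             escape_next = True
--         elif ch == '"':
--             if in_string:
--                 return True
--             in_string = True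
--             out.append(ch)
--         elif in_string and ch in ESC:
--             out.append(ESC[ch])
--         else:
--             out.append(ch)
--         return False
--
--     for ch in text:
--         if pending is not None:
--             if ch in WS:
--                 pending.append(ch)
--                 continue
--             if ch in DELIMS:
--                 # real close: quote + buffered whitespace verbatim, leave the string
--                 out.append('"')
--                 out.extend(pending)
--                 in_string = False
--             else:
--                 # stray quote: escape it, buffered whitespace stays in-string (escaped)
--                 out.append('\\"')
--                 out.extend(ESC.get(c, c) for c in pending)
--             pending = None
--         if normal(ch):
--             pending = []
--     if pending is not None:
--         # EOF after buffered whitespace counts as a real close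
--         out.append('"')
--         out.extend(pending)
--     return "".join(out)
-- ===== Notes on version B (the rewrite author's own statement) =====
-- stated objective: alternative
-- what changed: Replaced A's inner whitespace-lookahead loop (which re-scans the skipped whitespace in the main loop) by a single flat state-machine pass with a pending-close whitespace buffer: on an in-string quote the following whitespace is buffered once and flushed verbatim (real close) or escaped (stray quote) when the deciding character or EOF arrives.
import Mathlib
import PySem

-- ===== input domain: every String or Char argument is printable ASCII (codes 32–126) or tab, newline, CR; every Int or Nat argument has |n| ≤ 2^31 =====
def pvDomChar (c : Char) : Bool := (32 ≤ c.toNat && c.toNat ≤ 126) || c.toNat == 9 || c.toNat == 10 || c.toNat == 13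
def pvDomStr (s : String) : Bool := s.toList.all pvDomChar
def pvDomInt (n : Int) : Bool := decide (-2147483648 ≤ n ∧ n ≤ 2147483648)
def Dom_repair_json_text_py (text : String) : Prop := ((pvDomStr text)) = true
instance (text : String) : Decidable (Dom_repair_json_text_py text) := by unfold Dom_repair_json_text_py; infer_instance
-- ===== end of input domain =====

-- B replaces A's inner whitespace-lookahead loop by a single flat pass with a
-- pending-close whitespace buffer (alternative decomposition; no re-scan).

-- ===== PORT A =====
-- inner `while look_ahead < length and text[look_ahead] in " \t\r\n"` loop:
-- skip the leading whitespace of the remaining characters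
def pvSkipWs : List Char → List Char
  | [] => []
  | c :: cs =>
    if c = ' ' ∨ c = '\t' ∨ c = '\r' ∨ c = '\n' then pvSkipWs cs else c :: cs

-- the `while index < length` loop, as structural recursion over the remaining
-- characters (state: in_string, escape_next); branches in A's order
def pvRepairA : List Char → Bool → Bool → List Char
  | [], _, _ => []
  | c :: cs, inStr, esc =>
    if esc then c :: pvRepairA cs inStr false
    else if c = '\\' then c :: pvRepairA cs inStr true
    else if c = '"' then
      if inStr then
        match pvSkipWs cs with
        | n :: _ =>
          if ¬ (n = ',' ∨ n = '}' ∨ n = ']' ∨ n = ':') then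
            '\\' :: '"' :: pvRepairA cs true false          -- stray quote: escape it
          else '"' :: pvRepairA cs false false              -- real close
        | [] => '"' :: pvRepairA cs false false             -- next_char == "" : real close
      else '"' :: pvRepairA cs true false                   -- opening quote
    else if inStr ∧ c = '\n' then '\\' :: 'n' :: pvRepairA cs inStr false
    else if inStr ∧ c = '\r' then '\\' :: 'r' :: pvRepairA cs inStr false
    else if inStr ∧ c = '\t' then '\\' :: 't' :: pvRepairA cs inStr false
    else c :: pvRepairA cs inStr false

def repair_json_text_py (text : String) : String :=
  String.mk (pvRepairA text.toList false false)

-- ===== PORT B =====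
def pvIsWs (c : Char) : Bool := c = ' ' ∨ c = '\t' ∨ c = '\r' ∨ c = '\n'

def pvIsDelim (c : Char) : Bool := c = ',' ∨ c = '}' ∨ c = ']' ∨ c = ':'

-- ESC.get(c, c): whitespace escaping inside a string
def pvEscWs (c : Char) : List Char :=
  if c = '\n' then ['\\', 'n']
  else if c = '\r' then ['\\', 'r']
  else if c = '\t' then ['\\', 't']
  else [c]

-- state: (pending whitespace buffer (none = not pending), in_string, escape_next, output)
abbrev PvStB := Option (List Char) × Bool × Bool × List Char

-- `normal(ch)`: ordinary step; a `some []` first component signals pending mode entered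
def pvNormalStep (acc : List Char) (inStr esc : Bool) (c : Char) : PvStB :=
  if esc then (none, inStr, false, acc ++ [c])
  else if c = '\\' then (none, inStr, true, acc ++ [c])
  else if c = '"' then
    if inStr then (some [], true, false, acc)
    else (none, true, false, acc ++ [c])
  else if inStr ∧ c = '\n' then (none, inStr, false, acc ++ ['\\', 'n'])
  else if inStr ∧ c = '\r' then (none, inStr, false, acc ++ ['\\', 'r'])
  else if inStr ∧ c = '\t' then (none, inStr, false, acc ++ ['\\', 't'])
  else (none, inStr, false, acc ++ [c])

-- one iteration of the `for ch in text` loop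
def pvStepB (st : PvStB) (c : Char) : PvStB :=
  match st with
  | (some buf, _, _, acc) =>
    if pvIsWs c then (some (buf ++ [c]), true, false, acc)
    else if pvIsDelim c then pvNormalStep (acc ++ '"' :: buf) false false c
    else pvNormalStep (acc ++ '\\' :: '"' :: buf.flatMap pvEscWs) true false c
  | (none, inStr, esc, acc) => pvNormalStep acc inStr esc c

-- the trailing `if pending is not None` flush
def pvFinishB (st : PvStB) : List Char :=
  match st with
  | (some buf, _, _, acc) => acc ++ '"' :: buf
  | (none, _, _, acc) => acc

def repair_json_text_py_alt (text : String) : String :=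
  String.mk (pvFinishB (text.toList.foldl pvStepB (none, false, false, [])))

-- ===== PRECONDITION & SPEC =====
def Spec_repair_json_text_py (text : String) (out : String) : Prop := out = repair_json_text_py_alt text
instance (text : String) (out : String) : Decidable (Spec_repair_json_text_py text out) := by unfold Spec_repair_json_text_py; infer_instance

-- ===== CLAIM (what is proved, stated in full; the proofs are below) =====
def Claim_equal_repair_json_text_py : Prop := ∀ (text : String), Dom_repair_json_text_py text → Spec_repair_json_text_py text (repair_json_text_py text)

-- ===== LEMMAS AND PROOFS =====

-- what A produces after the '"'-in-string decision, phrased on (ws buffer, rest of input)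
def pvDecide (buf : List Char) (l : List Char) : List Char :=
  match pvSkipWs l with
  | [] => '"' :: (buf ++ pvRepairA l false false)
  | n :: _ =>
    if pvIsDelim n then '"' :: (buf ++ pvRepairA l false false)
    else '\\' :: '"' :: (buf.flatMap pvEscWs ++ pvRepairA l true false)

theorem pvRepairA_quote (cs : List Char) :
    pvRepairA ('"' :: cs) true false = pvDecide [] cs := by
  simp only [pvRepairA, pvDecide]
  cases h : pvSkipWs cs with
  | nil => simp
  | cons n rest =>
    by_cases hd : pvIsDelim n = true
    · have hd' : n = ',' ∨ n = '}' ∨ n = ']' ∨ n = ':' := by simpa [pvIsDelim] using hd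
      simp [hd, hd']
    · have hd' : ¬ (n = ',' ∨ n = '}' ∨ n = ']' ∨ n = ':') := by simpa [pvIsDelim] using hd
      simp [hd, hd']

theorem pvRepairA_cons_ws_false (c : Char) (h : pvIsWs c = true) (cs : List Char) :
    pvRepairA (c :: cs) false false = c :: pvRepairA cs false false := by
  simp only [pvIsWs, decide_eq_true_eq] at h
  rcases h with h | h | h | h <;> subst h <;> simp [pvRepairA]

theorem pvRepairA_cons_ws_true (c : Char) (h : pvIsWs c = true) (cs : List Char) :
    pvRepairA (c :: cs) true false = pvEscWs c ++ pvRepairA cs true false := by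
  simp only [pvIsWs, decide_eq_true_eq] at h
  rcases h with h | h | h | h <;> subst h <;> simp [pvRepairA, pvEscWs]

theorem pvSkipWs_cons_ws (c : Char) (h : pvIsWs c = true) (cs : List Char) :
    pvSkipWs (c :: cs) = pvSkipWs cs := by
  simp only [pvIsWs, decide_eq_true_eq] at h
  simp [pvSkipWs, h]

theorem pvSkipWs_cons_nonws (c : Char) (h : pvIsWs c = false) (cs : List Char) :
    pvSkipWs (c :: cs) = c :: cs := by
  simp only [pvIsWs, decide_eq_false_iff_not, not_or] at h
  simp [pvSkipWs, h.1, h.2.1, h.2.2.1, h.2.2.2]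

theorem pvDecide_ws (c : Char) (h : pvIsWs c = true) (buf cs : List Char) :
    pvDecide buf (c :: cs) = pvDecide (buf ++ [c]) cs := by
  simp only [pvDecide, pvSkipWs_cons_ws c h]
  cases pvSkipWs cs with
  | nil => simp [pvRepairA_cons_ws_false c h]
  | cons n rest =>
    by_cases hd : pvIsDelim n = true
    · simp [hd, pvRepairA_cons_ws_false c h]
    · simp [hd, pvRepairA_cons_ws_true c h, List.flatMap_append]

def PvNormal (l : List Char) : Prop :=
  ∀ inStr esc acc, pvFinishB (l.foldl pvStepB (none, inStr, esc, acc)) = acc ++ pvRepairA l inStr esc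

def PvPending (l : List Char) : Prop :=
  ∀ buf acc, pvFinishB (l.foldl pvStepB (some buf, true, false, acc)) = acc ++ pvDecide buf l

theorem pv_main : ∀ n : ℕ, ∀ l : List Char, l.length = n → PvNormal l ∧ PvPending l := by
  intro n
  induction n using Nat.strong_induction_on with
  | _ n IH =>
    intro l hl
    have hnorm : PvNormal l := by
      cases l with
      | nil => intro inStr esc acc; simp [pvFinishB, pvRepairA]
      | cons c cs =>
        have hcs : cs.length < n := by simp at hl; omega
        have IHcs := IH cs.length hcs cs rfl
        intro inStr esc acc
        simp only [List.foldl_cons, pvStepB]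
        cases esc with
        | true =>
          rw [show pvNormalStep acc inStr true c = (none, inStr, false, acc ++ [c]) from rfl,
            IHcs.1]
          simp [pvRepairA]
        | false =>
          simp only [pvNormalStep, Bool.false_eq_true, if_false]
          by_cases hbs : c = '\\'
          · rw [if_pos hbs, IHcs.1]
            simp [pvRepairA, hbs]
          · rw [if_neg hbs]
            by_cases hq : c = '"'
            · subst hq
              rw [if_pos rfl]
              cases inStr with
              | true =>
                rw [if_pos rfl, IHcs.2, pvRepairA_quote]
              | false =>
                rw [if_neg (by simp), IHcs.1]
                simp [pvRepairA, hbs]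
            · rw [if_neg hq]
              by_cases hn : inStr = true ∧ c = '\n'
              · rw [if_pos hn, IHcs.1]
                rcases hn with ⟨hi, hc⟩; subst hi; subst hc
                simp [pvRepairA, hbs, hq]
              · rw [if_neg hn]
                by_cases hr : inStr = true ∧ c = '\r'
                · rw [if_pos hr, IHcs.1]
                  rcases hr with ⟨hi, hc⟩; subst hi; subst hc
                  simp [pvRepairA, hbs, hq]
                · rw [if_neg hr]
                  by_cases ht : inStr = true ∧ c = '\t'
                  · rw [if_pos ht, IHcs.1]
                    rcases ht with ⟨hi, hc⟩; subst hi; subst hc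
                    simp [pvRepairA, hbs, hq]
                  · rw [if_neg ht, IHcs.1]
                    simp only [pvRepairA]
                    rw [if_neg (by simp), if_neg hbs, if_neg hq, if_neg hn, if_neg hr, if_neg ht]
                    simp
    refine ⟨hnorm, ?_⟩
    cases l with
    | nil =>
      intro buf acc
      simp [pvFinishB, pvDecide, pvSkipWs, pvRepairA]
    | cons c cs =>
      have hcs : cs.length < n := by simp at hl; omega
      have IHcs := IH cs.length hcs cs rfl
      intro buf acc
      simp only [List.foldl_cons, pvStepB]
      by_cases hw : pvIsWs c = true
      · rw [if_pos hw, IHcs.2, pvDecide_ws c hw]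
      · rw [if_neg hw]
        by_cases hd : pvIsDelim c = true
        · rw [if_pos hd]
          have hstep : pvNormalStep (acc ++ '"' :: buf) false false c =
              pvStepB (none, false, false, acc ++ '"' :: buf) c := rfl
          rw [hstep, ← List.foldl_cons, hnorm false false]
          simp [pvDecide, pvSkipWs_cons_nonws c (by simpa using hw), hd]
        · rw [if_neg hd]
          have hstep : pvNormalStep (acc ++ '\\' :: '"' :: buf.flatMap pvEscWs) true false c =
              pvStepB (none, true, false, acc ++ '\\' :: '"' :: buf.flatMap pvEscWs) c := rfl
          rw [hstep, ← List.foldl_cons, hnorm true false]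
          simp [pvDecide, pvSkipWs_cons_nonws c (by simpa using hw), hd]

-- ===== VERDICT (by name: the statement is the Claim_ definition above) =====
theorem repair_json_text_py_spec : Claim_equal_repair_json_text_py := by
  intro text _
  unfold Spec_repair_json_text_py repair_json_text_py repair_json_text_py_alt
  rw [(pv_main text.toList.length text.toList rfl).1 false false []]
  simp
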